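-- pv_equiv track=rewrite | github.com/manwar/perlweeklychallenge-club | challenge-322/sgreen/python/ch-1.py | string_format
-- ===== SOURCE A (Python) =====
-- def string_format(input_string: str, size: int) -> str:
--     # Remove existing dashes
--     input_string = input_string.replace("-", "")
--
--     # The start value is the position of the first characters, so the remaining
--     #  characters are a multiple of 'size'
--     start = len(input_string) % size
--     parts = []
--
--
--     if start:
--         # The first group will be smaller than the rest
--         parts.append(input_string[0:start])
--
--     for pos in range(start, len(input_string), size):
--         # Group the remain characters by size.
--         parts.append(input_string[pos:pos+size])
--
--     return '-'.join(parts)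
-- ===== SOURCE B (Python) =====
-- def string_format(input_string: str, size: int) -> str:
--     # Single left-to-right scan: strip dashes, then emit a dash before each
--     # character whose index is a group boundary (congruent to len % size).
--     stripped = input_string.replace("-", "")
--     offset = len(stripped) % size
--     out = []
--     for i, ch in enumerate(stripped):
--         if i > 0 and (i - offset) % size == 0:
--             out.append("-")
--         out.append(ch)
--     return "".join(out)
-- ===== Notes on version B (the rewrite author's own statement) =====
-- stated objective: alternative
-- what changed: A slices the stripped string into chunks with a range-stepped loop and joins them; B makes a single enumerate scan over the stripped characters, emitting a dash inline before every index congruent to len % size.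
-- intended difference: For negative size when the stripped string is nonempty, A returns an accidental dash-free truncation of the stripped string (or ''), an artefact of Python's empty negative-step range, while B groups the whole string by |size| (divisibility by size is sign-independent), the sensible reading of a group size on this unspecified corner. — e.g. on string_format("ab", -1): A returns "", B returns "a-b"
import Mathlib
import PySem

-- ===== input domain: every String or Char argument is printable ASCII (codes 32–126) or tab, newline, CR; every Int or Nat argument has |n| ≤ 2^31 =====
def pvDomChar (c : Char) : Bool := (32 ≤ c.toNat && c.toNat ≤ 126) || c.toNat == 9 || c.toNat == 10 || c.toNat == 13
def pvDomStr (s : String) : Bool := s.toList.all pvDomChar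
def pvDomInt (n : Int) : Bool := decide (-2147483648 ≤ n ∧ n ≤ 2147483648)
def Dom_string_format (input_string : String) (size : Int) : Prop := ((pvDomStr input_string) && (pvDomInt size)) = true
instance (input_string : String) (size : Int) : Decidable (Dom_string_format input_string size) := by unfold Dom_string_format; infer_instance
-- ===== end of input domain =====

-- B replaces A's slice-into-chunks loop by a single left-to-right scan that inserts a dash
-- before each character sitting on a group boundary (alternative decomposition, similar cost).

-- ===== PORT A =====
def string_format (input_string : String) (size : Int) : String :=
  let s := PySem.Str.replace input_string "-" ""
  let start := PySem.Int.mod (PySem.Str.len s) size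
  let parts : List String := if start ≠ 0 then [PySem.Str.slice s (some 0) (some start)] else []
  let parts := (PySem.List.pyRange start (PySem.Str.len s) size).foldl
      (fun ps pos => ps ++ [PySem.Str.slice s (some pos) (some (pos + size))]) parts
  PySem.Str.join "-" parts

-- ===== PORT B =====
def string_format_alt (input_string : String) (size : Int) : String :=
  let s := PySem.Str.replace input_string "-" ""
  let offset := PySem.Int.mod (PySem.Str.len s) size
  let out := (PySem.List.enumerate s.toList 0).foldl
      (fun acc p =>
        (if 0 < p.1 ∧ PySem.Int.mod (p.1 - offset) size = 0 then acc ++ ['-'] else acc) ++ [p.2]) []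
  String.ofList out

-- ===== PRECONDITION & SPEC =====
-- Pre_ excludes only size = 0, where A raises ZeroDivisionError on 'len % size'.
def Pre_string_format (input_string : String) (size : Int) : Prop := size ≠ 0
instance (input_string : String) (size : Int) : Decidable (Pre_string_format input_string size) := by unfold Pre_string_format; infer_instance

def pvWitness_string_format : String × Int := ("1-23-456", 2)

-- On negative size with a non-dash character present, A returns an accidental dash-free
-- truncation of the stripped string (or ''), an artefact of Python's empty negative-step range,
-- while B groups the whole string by |size| (divisibility by size is sign-independent), which is
-- the sensible reading of a group size on this unspecified corner.
def D_string_format (input_string : String) (size : Int) : Prop :=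
  size < 0 ∧ input_string.toList.any (fun c => c != '-') = true
instance (input_string : String) (size : Int) : Decidable (D_string_format input_string size) := by
  unfold D_string_format; infer_instance

def Spec_string_format (input_string : String) (size : Int) (out : String) : Prop :=
  ¬ D_string_format input_string size → out = string_format_alt input_string size
instance (input_string : String) (size : Int) (out : String) : Decidable (Spec_string_format input_string size out) := by
  unfold Spec_string_format; infer_instance

def pvDiffWitness_string_format : String × Int := ("ab", -1)
def pvDiffWitnessOut_string_format : String × String := ("", "a-b")

-- ===== CLAIM (what is proved, stated in full; the proofs are below) =====
def Claim_unchanged_string_format : Prop := ∀ (input_string : String) (size : Int), Dom_string_format input_string size → Pre_string_format input_string size → Spec_string_format input_string size (string_format input_string size)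
def Claim_changed_string_format : Prop := Dom_string_format (pvDiffWitness_string_format.1) (pvDiffWitness_string_format.2) ∧ Pre_string_format (pvDiffWitness_string_format.1) (pvDiffWitness_string_format.2) ∧ D_string_format (pvDiffWitness_string_format.1) (pvDiffWitness_string_format.2) ∧ string_format (pvDiffWitness_string_format.1) (pvDiffWitness_string_format.2) = pvDiffWitnessOut_string_format.1 ∧ string_format_alt (pvDiffWitness_string_format.1) (pvDiffWitness_string_format.2) = pvDiffWitnessOut_string_format.2 ∧ pvDiffWitnessOut_string_format.1 ≠ pvDiffWitnessOut_string_format.2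
def Claim_exact_string_format : Prop := ∀ (input_string : String) (size : Int), Dom_string_format input_string size → Pre_string_format input_string size → D_string_format input_string size → string_format input_string size ≠ string_format_alt input_string size

-- ===== LEMMAS AND PROOFS =====

-- the common reference shape: the stripped characters with a dash before every group boundary
def chunkM (L k : Nat) : Nat := if L % k = 0 then k else L % k

theorem chunkM_pos {L k : Nat} (_hk : 0 < k) : 0 < chunkM L k := by
  unfold chunkM; split <;> omega

theorem chunkM_le {L k : Nat} (hk : 0 < k) : chunkM L k ≤ k := by
  unfold chunkM; split
  · omega
  · exact le_of_lt (Nat.mod_lt _ hk)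

theorem chunkM_le_len {L k : Nat} (_hk : 0 < k) (hL : L ≠ 0) : chunkM L k ≤ L := by
  unfold chunkM; split
  · exact Nat.le_of_dvd (Nat.pos_of_ne_zero hL) (Nat.dvd_of_mod_eq_zero ‹L % k = 0›)
  · exact Nat.mod_le L k

theorem chunkM_dvd {L k : Nat} (_hk : 0 < k) : k ∣ (L - chunkM L k) := by
  unfold chunkM; split
  · exact Nat.dvd_sub (Nat.dvd_of_mod_eq_zero ‹L % k = 0›) dvd_rfl
  · have hdm := Nat.div_add_mod L k
    have : L - L % k = k * (L / k) := by omega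
    exact this ▸ Dvd.intro _ rfl

def chunksRec (t : List Char) (k : Nat) : List Char :=
  if _h : t.length = 0 ∨ k = 0 then t
  else
    if t.length ≤ chunkM t.length k then t
    else t.take (chunkM t.length k) ++ '-' :: chunksRec (t.drop (chunkM t.length k)) k
termination_by t.length
decreasing_by
  simp only [List.length_drop]
  have h1 : 0 < chunkM t.length k := chunkM_pos (by omega)
  omega

theorem chunksRec_nil (k : Nat) : chunksRec [] k = [] := by
  rw [chunksRec]; simp

theorem chunkM_of_dvd {L k : Nat} (_hk : 0 < k) (h : k ∣ L) : chunkM L k = k := by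
  unfold chunkM
  rw [if_pos (Nat.mod_eq_zero_of_dvd h)]

theorem pyRange_pos_nil {a b s : Int} (hs : 0 < s) (h : b ≤ a) : PySem.List.pyRange a b s = [] := by
  rw [PySem.List.pyRange_of_pos a b hs, if_neg (by omega)]
  simp

theorem pyRange_neg_nil {a b s : Int} (hs : s < 0) (h : a ≤ b) : PySem.List.pyRange a b s = [] := by
  rw [PySem.List.pyRange_of_neg a b hs, if_neg (by omega)]
  simp

theorem pyRange_pos_cons {a b s : Int} (hs : 0 < s) (h : a < b) :
    PySem.List.pyRange a b s = a :: PySem.List.pyRange (a + s) b s := by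
  rw [PySem.List.pyRange_of_pos a b hs, PySem.List.pyRange_of_pos (a+s) b hs]
  have hnum : b - a + s - 1 = (b - (a+s) + s - 1) + 1 * s := by ring
  have hcnt : ((b - a + s - 1) / s).toNat = ((b - (a+s) + s - 1) / s).toNat + 1 := by
    rw [hnum, Int.add_mul_ediv_right _ _ (by omega : s ≠ 0)]
    have h2 : 0 ≤ (b - (a+s) + s - 1) / s := by
      apply Int.ediv_nonneg <;> omega
    omega
  rw [if_pos h, hcnt, List.range_succ_eq_map]
  by_cases h2 : a + s < b
  · rw [if_pos h2, List.map_cons, List.map_map]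
    congr 1
    · norm_num
    · apply List.map_congr_left; intro k _; simp [Function.comp]; ring
  · rw [if_neg h2]
    have hz : (b - (a+s) + s - 1) / s = 0 := by
      have he : b - (a+s) + s - 1 = b - a - 1 := by ring
      rw [he]
      exact Int.ediv_eq_zero_of_lt (by omega) (by omega)
    simp [hz]

theorem join_cons_ne_nil (sep p : List Char) {l : List (List Char)} (h : l ≠ []) :
    PySem.Chars.join sep (p :: l) = p ++ sep ++ PySem.Chars.join sep l := by
  cases l with
  | nil => exact absurd rfl h
  | cons q r => exact PySem.Chars.join_cons_cons sep p q r

theorem replace_dash_go (fuel : Nat) :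
    ∀ (l acc : List Char), l.length ≤ fuel →
      PySem.Chars.replace.go ['-'] [] fuel l acc = acc.reverse ++ l.filter (fun c => c != '-') := by
  induction fuel with
  | zero =>
      intro l acc h
      have hl : l = [] := by cases l <;> simp_all
      subst hl; simp [PySem.Chars.replace.go]
  | succ n ih =>
      intro l acc h
      cases l with
      | nil => simp [PySem.Chars.replace.go]
      | cons c t =>
          simp only [PySem.Chars.replace.go]
          by_cases hc : c = '-'
          · subst hc
            rw [if_pos (by simp [List.isPrefixOf])]
            simp only [List.length_cons] at h
            rw [ih _ _ (by simpa using h)]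
            simp
          · rw [if_neg (by simp [List.isPrefixOf]; exact fun hh => hc hh.symm)]
            simp only [List.length_cons] at h
            rw [ih _ _ (by omega)]
            simp [hc]
theorem replace_dash (cs : List Char) :
    PySem.Chars.replace cs ['-'] [] = cs.filter (fun c => c != '-') := by
  rw [PySem.Chars.replace]
  rw [if_neg (by simp)]
  rw [replace_dash_go cs.length cs [] le_rfl]
  simp

-- A's slice loop, from any group boundary onward, produces the reference shape
theorem joinA (t : List Char) (k : Nat) (hk : 0 < k) :
    ∀ d (pos : Nat), t.length - pos = d → pos ≤ t.length → k ∣ (t.length - pos) →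
      PySem.Chars.join ['-'] ((PySem.List.pyRange (pos : Int) (t.length : Int) (k : Int)).map
          (fun p : Int => PySem.List.slice t (some p) (some (p + (k : Int)))))
        = chunksRec (t.drop pos) k := by
  intro d
  induction d using Nat.strong_induction_on with
  | _ d ih =>
    intro pos hd hle hdvd
    by_cases hend : pos < t.length
    case neg =>
      have hpe : pos = t.length := by omega
      rw [pyRange_pos_nil (by exact_mod_cast hk) (by exact_mod_cast (by omega : t.length ≤ pos))]
      rw [List.map_nil, PySem.Chars.join_nil, hpe, List.drop_length, chunksRec_nil]
    case pos =>
      rw [pyRange_pos_cons (by exact_mod_cast hk) (by exact_mod_cast hend)]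
      rw [List.map_cons]
      have hsl : PySem.List.slice t (some (pos : Int)) (some ((pos : Int) + (k : Int)))
          = (t.drop pos).take k := PySem.List.slice_natCast_add t pos k
      have hklen : k ≤ t.length - pos := Nat.le_of_dvd (by omega) hdvd
      have hcast : ((pos : Int) + (k : Int)) = (((pos + k : Nat)) : Int) := by push_cast; ring
      have hdl : (t.drop pos).length = t.length - pos := by simp
      have hmm : chunkM (t.drop pos).length k = k := by
        rw [hdl]; exact chunkM_of_dvd hk hdvd
      by_cases hone : t.length ≤ pos + k
      · have hnil : PySem.List.pyRange ((pos : Int) + (k : Int)) (t.length : Int) (k : Int) = [] := by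
          rw [hcast]
          exact pyRange_pos_nil (by exact_mod_cast hk) (by exact_mod_cast hone)
        rw [hnil, List.map_nil, PySem.Chars.join_singleton, hsl]
        rw [List.take_of_length_le (by omega)]
        rw [chunksRec]
        rw [dif_neg (by rw [hdl]; omega)]
        rw [if_pos (by rw [hmm, hdl]; omega)]
      · have hne : PySem.List.pyRange ((pos : Int) + (k : Int)) (t.length : Int) (k : Int) ≠ [] := by
          rw [hcast, pyRange_pos_cons (by exact_mod_cast hk) (by exact_mod_cast (by omega : pos + k < t.length))]
          simp
        rw [join_cons_ne_nil _ _ (by simpa using hne)]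
        rw [hsl, hcast]
        rw [ih (t.length - (pos + k)) (by omega) (pos + k) rfl (by omega)
              (by have h9 : t.length - (pos + k) = (t.length - pos) - k := by omega
                  rw [h9]; exact Nat.dvd_sub hdvd dvd_rfl)]
        have hcr : chunksRec (t.drop pos) k
            = (t.drop pos).take k ++ '-' :: chunksRec ((t.drop pos).drop k) k := by
          rw [chunksRec, hmm]
          rw [dif_neg (by rw [hdl]; omega)]
          rw [if_neg (by rw [hdl]; omega)]
        rw [hcr, List.drop_drop]
        simp

theorem noDash (k nTot : Nat) :
    ∀ (c : List Char) (s : Int), (∀ i : Int, s ≤ i → i < s + c.length → ¬ (0 < i ∧ (k : Int) ∣ ((nTot : Int) - i))) →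
      (PySem.List.enumerate c s).flatMap
          (fun p => (if 0 < p.1 ∧ (k : Int) ∣ ((nTot : Int) - p.1) then ['-'] else []) ++ [p.2]) = c := by
  intro c
  induction c with
  | nil => intro s _; simp [PySem.List.enumerate]
  | cons x xs ih =>
      intro s h
      rw [PySem.List.enumerate_cons, List.flatMap_cons]
      rw [if_neg (h s le_rfl (by simp)), ih (s + 1) (by intro i h1 h2; exact h i (by omega) (by simp at h2 ⊢; omega))]
      simp

theorem headDash (k nTot : Nat) (c : List Char) (s : Int) (hc : c ≠ [])
    (h : ∀ i : Int, s < i → i < s + c.length → ¬ (0 < i ∧ (k : Int) ∣ ((nTot : Int) - i))) :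
    (PySem.List.enumerate c s).flatMap
        (fun p => (if 0 < p.1 ∧ (k : Int) ∣ ((nTot : Int) - p.1) then ['-'] else []) ++ [p.2])
      = (if 0 < s ∧ (k : Int) ∣ ((nTot : Int) - s) then ['-'] else []) ++ c := by
  cases c with
  | nil => exact absurd rfl hc
  | cons x xs =>
      rw [PySem.List.enumerate_cons, List.flatMap_cons]
      rw [noDash k nTot xs (s + 1) (by intro i h1 h2; exact h i (by omega) (by simp at h2 ⊢; omega))]
      simp

theorem walkMain (k nTot : Nat) (hk : 0 < k) :
    ∀ d (t : List Char) (s : Nat), t.length = d → nTot = s + t.length →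
      (s = 0 ∨ (k : Int) ∣ ((nTot : Int) - (s : Int))) →
      (PySem.List.enumerate t (s : Int)).flatMap
          (fun p => (if 0 < p.1 ∧ (k : Int) ∣ ((nTot : Int) - p.1) then ['-'] else []) ++ [p.2])
        = (if s = 0 ∨ t = [] then [] else ['-']) ++ chunksRec t k := by
  intro d
  induction d using Nat.strong_induction_on with
  | _ d ih =>
    intro t s hd hn hinv
    by_cases ht : t = []
    · subst ht; simp [PySem.List.enumerate, chunksRec_nil]
    · have hL : t.length ≠ 0 := by simpa using ht
      have hm1 : 0 < chunkM t.length k := chunkM_pos hk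
      have hmk : chunkM t.length k ≤ k := chunkM_le hk
      have hmL : chunkM t.length k ≤ t.length := chunkM_le_len hk hL
      have hdvdN : (k : Int) ∣ ((t.length : Int) - (chunkM t.length k : Int)) := by
        have := Int.natCast_dvd_natCast.mpr (chunkM_dvd (L := t.length) (k := k) hk)
        rwa [Nat.cast_sub hmL] at this
      have hnts : (nTot : Int) - (s : Int) = (t.length : Int) := by
        have hn' : nTot = s + t.length := hn
        push_cast [hn']; ring
      have hlt : (List.take (chunkM t.length k) t).length = chunkM t.length k := by
        rw [List.length_take]; omega
      have hsplit : (PySem.List.enumerate t (s : Int)).flatMap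
            (fun p => (if 0 < p.1 ∧ (k : Int) ∣ ((nTot : Int) - p.1) then ['-'] else []) ++ [p.2])
          = (PySem.List.enumerate (List.take (chunkM t.length k) t) (s : Int)).flatMap
              (fun p => (if 0 < p.1 ∧ (k : Int) ∣ ((nTot : Int) - p.1) then ['-'] else []) ++ [p.2])
            ++ (PySem.List.enumerate (List.drop (chunkM t.length k) t) ((s : Int) + (chunkM t.length k : Int))).flatMap
              (fun p => (if 0 < p.1 ∧ (k : Int) ∣ ((nTot : Int) - p.1) then ['-'] else []) ++ [p.2]) := by
        conv_lhs => rw [← List.take_append_drop (chunkM t.length k) t]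
        rw [PySem.List.enumerate_append, List.flatMap_append, hlt]
      have hint : ∀ i : Int, (s : Int) < i → i < (s : Int) + ((List.take (chunkM t.length k) t).length : Int) →
          ¬ (0 < i ∧ (k : Int) ∣ ((nTot : Int) - i)) := by
        rw [hlt]
        intro i h1 h2 hQ
        obtain ⟨_, hdvd⟩ := hQ
        have h3 : (k : Int) ∣ ((nTot : Int) - (s : Int) - (chunkM t.length k : Int)) := by
          rw [hnts]; exact hdvdN
        have h4 : (k : Int) ∣ ((s : Int) + (chunkM t.length k : Int) - i) := by
          have hsub := dvd_sub hdvd h3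
          have he : (nTot : Int) - i - ((nTot : Int) - (s : Int) - (chunkM t.length k : Int))
              = (s : Int) + (chunkM t.length k : Int) - i := by ring
          rwa [he] at hsub
        have h5 : (k : Int) ≤ (s : Int) + (chunkM t.length k : Int) - i := Int.le_of_dvd (by omega) h4
        omega
      have hhead : (PySem.List.enumerate (List.take (chunkM t.length k) t) (s : Int)).flatMap
            (fun p => (if 0 < p.1 ∧ (k : Int) ∣ ((nTot : Int) - p.1) then ['-'] else []) ++ [p.2])
          = (if s = 0 then [] else ['-']) ++ List.take (chunkM t.length k) t := by
        rw [headDash k nTot (List.take (chunkM t.length k) t) (s : Int)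
              (by apply List.ne_nil_of_length_pos; rw [hlt]; omega) hint]
        congr 1
        by_cases hs0 : s = 0
        · subst hs0; rw [if_pos rfl, if_neg (by simp)]
        · rw [if_neg hs0, if_pos]
          refine ⟨by omega, ?_⟩
          rcases hinv with h | h
          · omega
          · exact h
      by_cases hdrop : List.drop (chunkM t.length k) t = []
      · have hLm : t.length = chunkM t.length k := by
          have := List.drop_eq_nil_iff.mp hdrop
          omega
        have htk : List.take (chunkM t.length k) t = t := List.take_of_length_le (by omega)
        rw [hsplit, hhead, hdrop, htk]
        have hcr : chunksRec t k = t := by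
          rw [chunksRec]
          rw [dif_neg (by omega)]
          rw [if_pos (by omega)]
        rw [hcr]
        simp [PySem.List.enumerate, ht]
      · have hmL' : chunkM t.length k < t.length := by
          have := List.drop_eq_nil_iff.not.mp hdrop
          omega
        have hih := ih (t.length - chunkM t.length k) (by omega) (List.drop (chunkM t.length k) t) (s + chunkM t.length k)
          (by simp [List.length_drop]) (by simp [List.length_drop]; omega)
          (Or.inr (by push_cast
                      rw [show ((nTot : Int) - ((s : Int) + (chunkM t.length k : Int)))
                            = ((nTot : Int) - (s : Int) - (chunkM t.length k : Int)) by ring, hnts]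
                      exact hdvdN))
        have hcond : ¬(s + chunkM t.length k = 0 ∨ List.drop (chunkM t.length k) t = []) := by
          rintro (h | h)
          · omega
          · exact hdrop h
        rw [if_neg hcond] at hih
        rw [hsplit, hhead]
        rw [show ((s : Int) + (chunkM t.length k : Int)) = (((s + chunkM t.length k : Nat) : Int)) by push_cast; ring, hih]
        have hcr : chunksRec t k = List.take (chunkM t.length k) t ++ '-' :: chunksRec (List.drop (chunkM t.length k) t) k := by
          rw [chunksRec]
          rw [dif_neg (by omega)]
          rw [if_neg (by omega)]
        rw [hcr]
        simp [ht]

theorem main_pos (input_string : String) (size : Int) (hs : 0 < size) :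
    string_format input_string size = string_format_alt input_string size := by
  refine String.toList_inj.mp ?_
  simp only [string_format, string_format_alt]
  set st := PySem.Str.replace input_string "-" "" with hstdef
  set t := st.toList with htdef
  set k := size.toNat with hkdef
  have hk : (k : Int) = size := Int.toNat_of_nonneg hs.le
  have hk0 : 0 < k := by omega
  have hnL : PySem.Str.len st = ((t.length : Nat) : Int) := by rw [PySem.Str.len_eq]
  have hoff : PySem.Int.mod (PySem.Str.len st) size = ((t.length % k : Nat) : Int) := by
    rw [hnL, ← hk, PySem.Int.mod_natCast]
  have hdvdLo : (k : Int) ∣ ((t.length : Int) - ((t.length % k : Nat) : Int)) := by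
    have h1 : k ∣ t.length - t.length % k := Nat.dvd_sub_mod t.length
    have h2 := Int.natCast_dvd_natCast.mpr h1
    rwa [Nat.cast_sub (Nat.mod_le _ _)] at h2
  have hcond : (fun p : Int × Char => (if 0 < p.1 ∧ PySem.Int.mod (p.1 - PySem.Int.mod (PySem.Str.len st) size) size = 0 then ['-'] else []) ++ [p.2])
      = (fun p : Int × Char => (if 0 < p.1 ∧ (k : Int) ∣ ((t.length : Int) - p.1) then ['-'] else []) ++ [p.2]) := by
    funext p
    congr 1
    refine if_congr (and_congr_right fun _ => ?_) rfl rfl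
    rw [PySem.Int.mod_eq_zero_iff_dvd, hoff, ← hk]
    constructor
    · intro h
      have h3 := dvd_sub hdvdLo h
      have he : ((t.length : Int) - ((t.length % k : Nat) : Int)) - (p.1 - ((t.length % k : Nat) : Int)) = (t.length : Int) - p.1 := by ring
      rwa [he] at h3
    · intro h
      have h3 := dvd_sub hdvdLo h
      have he : ((t.length : Int) - ((t.length % k : Nat) : Int)) - ((t.length : Int) - p.1) = p.1 - ((t.length % k : Nat) : Int) := by ring
      rwa [he] at h3
  have hB : (PySem.List.enumerate t 0).foldl
        (fun acc p => (if 0 < p.1 ∧ PySem.Int.mod (p.1 - PySem.Int.mod (PySem.Str.len st) size) size = 0 then acc ++ ['-'] else acc) ++ [p.2]) []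
      = chunksRec t k := by
    have hb1 : (fun (acc : List Char) (p : Int × Char) => (if 0 < p.1 ∧ PySem.Int.mod (p.1 - PySem.Int.mod (PySem.Str.len st) size) size = 0 then acc ++ ['-'] else acc) ++ [p.2])
        = (fun acc p => acc ++ ((if 0 < p.1 ∧ PySem.Int.mod (p.1 - PySem.Int.mod (PySem.Str.len st) size) size = 0 then ['-'] else []) ++ [p.2])) := by
      funext acc p
      by_cases hc : 0 < p.1 ∧ PySem.Int.mod (p.1 - PySem.Int.mod (PySem.Str.len st) size) size = 0
      · rw [if_pos hc, if_pos hc]; simp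
      · rw [if_neg hc, if_neg hc]; simp
    rw [hb1, PySem.List.foldl_append_eq_flatMap, hcond]
    have hw := walkMain k t.length hk0 t.length t 0 rfl (by simp) (Or.inl rfl)
    simp only [Nat.cast_zero] at hw
    rw [hw]
    simp
  rw [PySem.List.foldl_append_singleton_eq_map]
  rw [PySem.Str.toList_join]
  have hdash : ("-" : String).toList = ['-'] := by decide
  rw [hdash, List.map_append, List.map_map]
  have hslmap : List.map (String.toList ∘ fun pos => PySem.Str.slice st (some pos) (some (pos + size)))
        (PySem.List.pyRange (PySem.Int.mod (PySem.Str.len st) size) (PySem.Str.len st) size)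
      = List.map (fun p : Int => PySem.List.slice t (some p) (some (p + (k : Int))))
        (PySem.List.pyRange ((t.length % k : Nat) : Int) (t.length : Int) (k : Int)) := by
    rw [hoff, hnL, hk]
    refine List.map_congr_left fun p _ => ?_
    simp only [Function.comp_apply, PySem.Str.toList_slice, PySem.Chars.slice]
    rfl
  rw [hslmap, String.toList_ofList, hB]
  by_cases hr : t.length % k = 0
  · rw [if_neg (by rw [hoff, hr]; simp)]
    rw [List.map_nil, List.nil_append]
    have hj := joinA t k hk0 t.length 0 (by omega) (by omega) (by simpa using Nat.dvd_of_mod_eq_zero hr)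
    rw [List.drop_zero] at hj
    rw [hr]
    simpa using hj
  · rw [if_pos (by rw [hoff]; intro hh; exact hr (by exact_mod_cast hh))]
    rw [hoff]
    have hsl0 : List.map String.toList [PySem.Str.slice st (some 0) (some ((t.length % k : Nat) : Int))]
        = [t.take (t.length % k)] := by
      simp only [List.map_cons, List.map_nil, PySem.Str.toList_slice, PySem.Chars.slice]
      rw [PySem.List.slice_toNat _ le_rfl (Int.natCast_nonneg _)]
      have hmn : (((t.length : Int)) % ((k : Nat) : Int)).toNat = t.length % k := by omega
      simp [hmn]
      rw [htdef]
    rw [hsl0]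
    have hcm : chunkM t.length k = t.length % k := by
      unfold chunkM; rw [if_neg hr]
    have hL0 : t.length ≠ 0 := by
      intro hh; rw [hh] at hr; simp at hr
    have hrle : t.length % k ≤ t.length := Nat.mod_le _ _
    by_cases hrL : t.length ≤ t.length % k
    · have hnil : PySem.List.pyRange ((t.length % k : Nat) : Int) (t.length : Int) (k : Int) = [] :=
        pyRange_pos_nil (by exact_mod_cast hk0) (by exact_mod_cast hrL)
      rw [hnil, List.map_nil, List.append_nil, PySem.Chars.join_singleton]
      rw [List.take_of_length_le (by omega)]
      rw [chunksRec, dif_neg (by omega), if_pos (by rw [hcm]; omega)]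
    · have hrlt : t.length % k < t.length := by omega
      have hne : PySem.List.pyRange ((t.length % k : Nat) : Int) (t.length : Int) (k : Int) ≠ [] := by
        rw [pyRange_pos_cons (by exact_mod_cast hk0) (by exact_mod_cast hrlt)]
        simp
      rw [List.singleton_append, join_cons_ne_nil _ _ (by simpa using hne)]
      rw [joinA t k hk0 (t.length - t.length % k) (t.length % k) rfl (by omega)
            (Nat.dvd_sub_mod t.length)]
      have hcr : chunksRec t k = t.take (t.length % k) ++ '-' :: chunksRec (t.drop (t.length % k)) k := by
        rw [chunksRec, dif_neg (by omega), hcm]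
        rw [if_neg (by omega)]
      rw [hcr]
      simp

theorem stripped_toList (input_string : String) :
    (PySem.Str.replace input_string "-" "").toList = input_string.toList.filter (fun c => c != '-') := by
  rw [PySem.Str.toList_replace]
  rw [show ("-" : String).toList = ['-'] from by decide, show ("" : String).toList = [] from by decide]
  exact replace_dash _

theorem main_neg_empty (input_string : String) (size : Int) (hs : size < 0)
    (hall : ∀ c ∈ input_string.toList, c = '-') :
    string_format input_string size = string_format_alt input_string size := by
  have ht : (PySem.Str.replace input_string "-" "").toList = [] := by
    rw [stripped_toList]
    exact List.filter_eq_nil_iff.mpr (fun c hc => by simp [hall c hc])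
  refine String.toList_inj.mp ?_
  simp only [string_format, string_format_alt]
  have hlen0 : PySem.Str.len (PySem.Str.replace input_string "-" "") = 0 := by
    rw [PySem.Str.len_eq, ht]; simp
  have hoff : PySem.Int.mod (PySem.Str.len (PySem.Str.replace input_string "-" "")) size = 0 := by
    rw [hlen0]
    exact (PySem.Int.mod_eq_zero_iff_dvd _ _).mpr (dvd_zero _)
  rw [hoff, hlen0, if_neg (by simp), pyRange_neg_nil hs le_rfl, List.foldl_nil]
  rw [ht, PySem.List.enumerate_nil, List.foldl_nil]
  rw [PySem.Str.toList_join]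
  simp [PySem.Chars.join_nil]

theorem flatMap_len_ge (l : List (Int × Char))
    (f : Int × Char → List Char) (hf : ∀ p, 1 ≤ (f p).length) :
    l.length ≤ (l.flatMap f).length := by
  induction l with
  | nil => simp
  | cons x xs ih =>
      rw [List.flatMap_cons, List.length_append, List.length_cons]
      have := hf x
      omega

-- ===== VERDICT (by name: the statement is the Claim_ definition above) =====
theorem string_format_spec : Claim_unchanged_string_format := by
  intro input_string size _ hpre hd
  rcases lt_trichotomy size 0 with h | h | h
  · have hall : ∀ c ∈ input_string.toList, c = '-' := by
      unfold D_string_format at hd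
      intro c hc
      by_contra hne
      exact hd ⟨h, List.any_eq_true.mpr ⟨c, hc, by simpa using hne⟩⟩
    exact main_neg_empty input_string size h hall
  · exact absurd h hpre
  · exact main_pos input_string size h

set_option maxRecDepth 4000 in
theorem string_format_changed : Claim_changed_string_format := by
  have h1 : Dom_string_format "ab" (-1) := by decide
  have h2 : Pre_string_format "ab" (-1) := by decide
  have h3 : D_string_format "ab" (-1) := by decide
  have h4 : string_format "ab" (-1) = "" := by decide
  have h5 : string_format_alt "ab" (-1) = "a-b" := by decide
  have h6 : ("" : String) ≠ "a-b" := by decide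
  exact ⟨h1, h2, h3, h4, h5, h6⟩

theorem string_format_tight : Claim_exact_string_format := by
  intro input_string size _ hpre hD
  obtain ⟨hneg, hany⟩ := hD
  intro heq
  have htne : (PySem.Str.replace input_string "-" "").toList ≠ [] := by
    rw [stripped_toList]
    obtain ⟨c, hc, hcne⟩ := List.any_eq_true.mp hany
    intro hnil
    have hm : c ∈ input_string.toList.filter (fun c => c != '-') := List.mem_filter.mpr ⟨hc, hcne⟩
    rw [hnil] at hm
    simp at hm
  have hLpos : 0 < (PySem.Str.replace input_string "-" "").toList.length := List.length_pos_of_ne_nil htne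
  have hbounds := PySem.Int.mod_neg_bounds (a := PySem.Str.len (PySem.Str.replace input_string "-" "")) hneg
  have hlennn : (0 : Int) ≤ PySem.Str.len (PySem.Str.replace input_string "-" "") := by
    rw [PySem.Str.len_eq]; positivity
  have hA : (string_format input_string size).toList.length < (PySem.Str.replace input_string "-" "").toList.length := by
    simp only [string_format]
    rw [pyRange_neg_nil hneg (by omega), List.foldl_nil]
    by_cases hoff0 : PySem.Int.mod (PySem.Str.len (PySem.Str.replace input_string "-" "")) size = 0
    · rw [hoff0]
      rw [if_neg (by simp)]
      rw [PySem.Str.toList_join]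
      simp only [List.map_nil, PySem.Chars.join_nil, List.length_nil]
      simpa using hLpos
    · rw [if_pos hoff0]
      rw [PySem.Str.toList_join, List.map_cons, List.map_nil, PySem.Chars.join_singleton]
      rw [PySem.Str.toList_slice, PySem.Chars.slice]
      obtain ⟨j, hj1, hoffeq⟩ : ∃ j : Nat, 1 ≤ j ∧
          PySem.Int.mod (PySem.Str.len (PySem.Str.replace input_string "-" "")) size = -(j : Int) := by
        refine ⟨(-(PySem.Int.mod (PySem.Str.len (PySem.Str.replace input_string "-" "")) size)).toNat, ?_, ?_⟩ <;> omega
      rw [hoffeq, PySem.List.slice_zero_start, PySem.List.slice_to_neg_natCast _ j (by omega)]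
      simp only [List.length_take]
      omega
  have hB : (PySem.Str.replace input_string "-" "").toList.length ≤ (string_format_alt input_string size).toList.length := by
    simp only [string_format_alt]
    rw [String.toList_ofList]
    have hb1 : (fun (acc : List Char) (p : Int × Char) => (if 0 < p.1 ∧ PySem.Int.mod (p.1 - PySem.Int.mod (PySem.Str.len (PySem.Str.replace input_string "-" "")) size) size = 0 then acc ++ ['-'] else acc) ++ [p.2])
        = (fun acc p => acc ++ ((if 0 < p.1 ∧ PySem.Int.mod (p.1 - PySem.Int.mod (PySem.Str.len (PySem.Str.replace input_string "-" "")) size) size = 0 then ['-'] else []) ++ [p.2])) := by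
      funext acc p
      by_cases hc : 0 < p.1 ∧ PySem.Int.mod (p.1 - PySem.Int.mod (PySem.Str.len (PySem.Str.replace input_string "-" "")) size) size = 0
      · rw [if_pos hc, if_pos hc]; simp
      · rw [if_neg hc, if_neg hc]; simp
    rw [hb1, PySem.List.foldl_append_eq_flatMap, List.nil_append]
    have hge := flatMap_len_ge (PySem.List.enumerate (PySem.Str.replace input_string "-" "").toList 0)
      (fun p => (if 0 < p.1 ∧ PySem.Int.mod (p.1 - PySem.Int.mod (PySem.Str.len (PySem.Str.replace input_string "-" "")) size) size = 0 then ['-'] else []) ++ [p.2])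
      (by intro p; simp)
    rwa [PySem.List.length_enumerate] at hge
  have hlen := congrArg (fun s : String => s.toList.length) heq
  simp only at hlen
  omega
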